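-- pv_equiv track=rewrite | github.com/jovianjaison/CBIR | helper.py | create_column_names
-- ===== SOURCE A (Python) =====
-- def create_column_names(cols, no_of_levels):
-- 	if(no_of_levels == 0):
-- 		return cols
-- 	else:
-- 		col = []
-- 		for c in cols:
-- 			col.append("lower_"+c)
-- 			col.append("upper_"+c)
-- 		return create_column_names(col,no_of_levels-1)
-- ===== SOURCE B (Python) =====
-- def create_column_names(cols, no_of_levels):
--     cur = list(cols)
--     for _ in range(no_of_levels):
--         cur = [prefix + c for c in cur for prefix in ("lower_", "upper_")]
--     return cur
-- ===== Notes on version B (the rewrite author's own statement) =====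
-- stated objective: simpler
-- what changed: Tail recursion with an explicit append-loop per level is replaced by an iterative range loop whose body builds each level as a single flattening list comprehension.
import Mathlib
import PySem

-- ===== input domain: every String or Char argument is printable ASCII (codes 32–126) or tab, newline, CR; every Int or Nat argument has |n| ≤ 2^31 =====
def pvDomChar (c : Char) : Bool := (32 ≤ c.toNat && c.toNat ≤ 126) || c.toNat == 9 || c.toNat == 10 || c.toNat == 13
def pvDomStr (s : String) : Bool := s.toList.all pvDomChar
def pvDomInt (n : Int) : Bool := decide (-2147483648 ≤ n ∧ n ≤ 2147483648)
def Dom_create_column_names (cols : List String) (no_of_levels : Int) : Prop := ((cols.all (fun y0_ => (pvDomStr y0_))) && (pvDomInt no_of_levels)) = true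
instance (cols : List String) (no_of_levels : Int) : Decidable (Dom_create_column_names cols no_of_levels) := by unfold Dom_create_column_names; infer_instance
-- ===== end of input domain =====

-- B replaces A's tail recursion (append-loop per level) by an iterative level loop whose body
-- is one flattening comprehension; same values on no_of_levels ≥ 0 (A raises RecursionError below 0).

-- ===== PORT A =====
-- literal port of A's recursion; the `no_of_levels < 0` guard is a totality guard only:
-- there the Python A recurses forever (RecursionError), which Pre_ excludes.
def create_column_names (cols : List String) (no_of_levels : Int) : List String :=
  if no_of_levels = 0 then cols
  else if no_of_levels < 0 then cols
  else create_column_names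
    (cols.foldl (fun col c => col ++ ["lower_" ++ c, "upper_" ++ c]) [])
    (no_of_levels - 1)
termination_by no_of_levels.toNat
decreasing_by omega

-- ===== PORT B =====
def create_column_names_alt (cols : List String) (no_of_levels : Int) : List String :=
  (PySem.List.pyRange 0 no_of_levels 1).foldl
    (fun cur _ => cur.flatMap (fun c => ["lower_" ++ c, "upper_" ++ c]))
    cols

-- ===== PRECONDITION & SPEC =====
-- Pre_ excludes negative no_of_levels, on which the Python A raises RecursionError.
def Pre_create_column_names (cols : List String) (no_of_levels : Int) : Prop :=
  0 ≤ no_of_levels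
instance (cols : List String) (no_of_levels : Int) : Decidable (Pre_create_column_names cols no_of_levels) := by unfold Pre_create_column_names; infer_instance
def pvWitness_create_column_names : List String × Int := (["id", "price"], 2)

def Spec_create_column_names (cols : List String) (no_of_levels : Int) (out : List String) : Prop := out = create_column_names_alt cols no_of_levels
instance (cols : List String) (no_of_levels : Int) (out : List String) : Decidable (Spec_create_column_names cols no_of_levels out) := by unfold Spec_create_column_names; infer_instance

-- ===== CLAIM (what is proved, stated in full; the proofs are below) =====
def Claim_equal_create_column_names : Prop := ∀ (cols : List String) (no_of_levels : Int), Dom_create_column_names cols no_of_levels → Pre_create_column_names cols no_of_levels → Spec_create_column_names cols no_of_levels (create_column_names cols no_of_levels)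

-- ===== LEMMAS AND PROOFS =====

-- a fold whose body ignores the element only depends on the list's length
theorem foldl_const_congr_length {α β : Type} (f : β → β) (l₁ : List α) (l₂ : List α)
    (init : β) (h : l₁.length = l₂.length) :
    l₁.foldl (fun acc _ => f acc) init = l₂.foldl (fun acc _ => f acc) init := by
  induction l₁ generalizing l₂ init with
  | nil => cases l₂ <;> simp_all
  | cons x xs ih =>
    cases l₂ with
    | nil => simp at h
    | cons y ys => simp at h; simpa using ih ys (f init) h

-- B peels one level in front, like A's recursion
theorem alt_succ (cols : List String) (n : Int) (h : 0 < n) :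
    create_column_names_alt cols n =
      create_column_names_alt (cols.flatMap (fun c => ["lower_" ++ c, "upper_" ++ c])) (n - 1) := by
  unfold create_column_names_alt
  rw [PySem.List.pyRange_one_cons (by omega : (0:Int) < n)]
  simp only [List.foldl_cons]
  exact foldl_const_congr_length _ _ _ _ (by
    simp [PySem.List.length_pyRange_one])

theorem equal_aux (k : Nat) : ∀ (cols : List String) (n : Int), n.toNat = k → 0 ≤ n →
    create_column_names cols n = create_column_names_alt cols n := by
  induction k with
  | zero =>
    intro cols n hk hn
    have h0 : n = 0 := by omega
    subst h0
    simp [create_column_names, create_column_names_alt]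
  | succ k ih =>
    intro cols n hk hn
    have hpos : 0 < n := by omega
    rw [create_column_names]
    simp only [if_neg (by omega : ¬ n = 0), if_neg (by omega : ¬ n < 0)]
    rw [ih _ (n - 1) (by omega) (by omega), alt_succ cols n hpos]
    congr 1
    simpa using PySem.List.foldl_append_eq_flatMap
      (fun c => ["lower_" ++ c, "upper_" ++ c]) cols []

-- ===== VERDICT (by name: the statement is the Claim_ definition above) =====
theorem create_column_names_spec : Claim_equal_create_column_names := by
  intro cols n _ hpre
  unfold Spec_create_column_names
  exact equal_aux n.toNat cols n rfl hpre
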